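-- pv_equiv track=rewrite | github.com/atisozols/10-klase | funkcijas/2026/funkcijas_2026.py | balsojuma_rezultats
-- ===== SOURCE A (Python) =====
-- def balsojuma_rezultats(balsis):
--     record = 0
--     record_holder = ""
--     result = {}
--
--     for balss in balsis:
--         result[balss] = result.get(balss, 0) + 1
--         if result[balss] > record:
--             record = result[balss]
--             record_holder = balss
--
--     return {record_holder: record}
-- ===== SOURCE B (Python) =====
-- def balsojuma_rezultats(balsis):
--     if not balsis:
--         return {"": 0}
--     counts = {}
--     for b in balsis:
--         counts[b] = counts.get(b, 0) + 1
--     m = max(counts.values())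
--     seen = {}
--     for b in balsis:
--         seen[b] = seen.get(b, 0) + 1
--         if seen[b] == m:
--             return {b: m}
-- ===== Notes on version B (the rewrite author's own statement) =====
-- stated objective: alternative
-- what changed: A fuses counting and record-tracking into one pass with a running record; B first builds the full count table and its maximum m, then a second pass returns the first vote whose running count reaches m (same first-to-reach tie-break), with the empty input handled explicitly.
import Mathlib
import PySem

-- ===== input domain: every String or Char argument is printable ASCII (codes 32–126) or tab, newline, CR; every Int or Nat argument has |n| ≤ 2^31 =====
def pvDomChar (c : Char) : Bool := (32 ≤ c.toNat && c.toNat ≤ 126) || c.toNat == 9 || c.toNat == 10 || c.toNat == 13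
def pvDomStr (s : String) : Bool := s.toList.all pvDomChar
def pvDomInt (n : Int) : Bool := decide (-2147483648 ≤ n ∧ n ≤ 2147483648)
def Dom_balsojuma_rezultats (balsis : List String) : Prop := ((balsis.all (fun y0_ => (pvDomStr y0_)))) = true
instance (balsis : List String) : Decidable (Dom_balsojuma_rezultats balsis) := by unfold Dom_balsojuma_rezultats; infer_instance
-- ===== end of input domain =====

-- B replaces A's fused single pass (running record + counts in one loop) by a plain
-- two-pass decomposition: full count table + its max, then first vote to reach that max.

-- ===== PORT A =====
-- one loop iteration of A: update the count of `balss`, then maybe the record/holder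
def stepA (st : Int × String × PySem.Dict String Int) (balss : String) :
    Int × String × PySem.Dict String Int :=
  let res := st.2.2.insert balss (st.2.2.getD balss 0 + 1)
  if res.getD balss 0 > st.1 then (res.getD balss 0, balss, res) else (st.1, st.2.1, res)

def balsojuma_rezultats (balsis : List String) : List (String × Int) :=
  let st := balsis.foldl stepA (0, "", PySem.Dict.empty)
  [(st.2.1, st.1)]

-- ===== PORT B =====
-- B's second loop: first b whose running count equals m ([] is unreachable for nonempty input)
def bScan (m : Int) (seen : PySem.Dict String Int) : List String → List (String × Int)
  | [] => []
  | b :: rest =>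
      let seen' := seen.insert b (seen.getD b 0 + 1)
      if seen'.getD b 0 = m then [(b, m)] else bScan m seen' rest

def balsojuma_rezultats_alt (balsis : List String) : List (String × Int) :=
  if balsis.isEmpty then [("", 0)]
  else
    let counts := balsis.foldl (fun d b => d.insert b (d.getD b 0 + 1)) PySem.Dict.empty
    let m := (PySem.List.max? counts.values (fun v => v)).getD 0
    bScan m PySem.Dict.empty balsis

-- ===== PRECONDITION & SPEC =====
def Spec_balsojuma_rezultats (balsis : List String) (out : List (String × Int)) : Prop := out = balsojuma_rezultats_alt balsis
instance (balsis : List String) (out : List (String × Int)) : Decidable (Spec_balsojuma_rezultats balsis out) := by unfold Spec_balsojuma_rezultats; infer_instance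

-- ===== CLAIM (what is proved, stated in full; the proofs are below) =====
def Claim_equal_balsojuma_rezultats : Prop := ∀ (balsis : List String), Dom_balsojuma_rezultats balsis → Spec_balsojuma_rezultats balsis (balsojuma_rezultats balsis)

-- ===== LEMMAS AND PROOFS =====

-- Invariant induction over A's fused loop: the record bounds every count, the holder's
-- count equals the record, the count dict is the plain counting fold, and either the
-- record never moved or B's scan (targeting the final record) stops exactly at the holder.
lemma stepA_invariant : ∀ (l : List String) (rec : Int) (hold : String)
    (res : PySem.Dict String Int),
    (∀ k, res.getD k 0 ≤ rec) → res.getD hold 0 = rec →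
    (∀ k, (l.foldl stepA (rec, hold, res)).2.2.getD k 0 ≤ (l.foldl stepA (rec, hold, res)).1) ∧
    (l.foldl stepA (rec, hold, res)).2.2.getD (l.foldl stepA (rec, hold, res)).2.1 0
      = (l.foldl stepA (rec, hold, res)).1 ∧
    (l.foldl stepA (rec, hold, res)).2.2
      = l.foldl (fun d b => d.insert b (d.getD b 0 + 1)) res ∧
    (((l.foldl stepA (rec, hold, res)).1 = rec ∧ (l.foldl stepA (rec, hold, res)).2.1 = hold) ∨
      (rec < (l.foldl stepA (rec, hold, res)).1 ∧
        bScan (l.foldl stepA (rec, hold, res)).1 res l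
          = [((l.foldl stepA (rec, hold, res)).2.1, (l.foldl stepA (rec, hold, res)).1)])) := by
  intro l
  induction l with
  | nil =>
      intro rec hold res hle hhold
      exact ⟨hle, hhold, rfl, Or.inl ⟨rfl, rfl⟩⟩
  | cons b l ih =>
      intro rec hold res hle hhold
      have hc : (res.insert b (res.getD b 0 + 1)).getD b 0 = res.getD b 0 + 1 :=
        PySem.Dict.getD_insert_self res b (res.getD b 0 + 1) 0
      by_cases hgt : res.getD b 0 + 1 > rec
      · -- record updates: new state (c, b, res1), c = rec + 1
        have hceq : res.getD b 0 + 1 = rec + 1 := by have := hle b; omega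
        have hstep : stepA (rec, hold, res) b
            = (rec + 1, b, res.insert b (res.getD b 0 + 1)) := by
          simp only [stepA, hc]
          rw [if_pos (by omega)]
          simp [hceq]
        have h1 : ∀ k, (res.insert b (res.getD b 0 + 1)).getD k 0 ≤ rec + 1 := by
          intro k
          rw [PySem.Dict.getD_insert]
          split
          · omega
          · have := hle k; omega
        have h2 : (res.insert b (res.getD b 0 + 1)).getD b 0 = rec + 1 := by
          rw [hc]; omega
        have H := ih (rec + 1) b (res.insert b (res.getD b 0 + 1)) h1 h2
        simp only [List.foldl_cons, hstep]
        refine ⟨H.1, H.2.1, H.2.2.1, Or.inr ?_⟩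
        rcases H.2.2.2 with ⟨he, hh⟩ | ⟨hlt, hscan⟩
        · refine ⟨by omega, ?_⟩
          simp only [bScan, hc]
          rw [if_pos (by omega)]
          rw [he, hh]
        · refine ⟨by omega, ?_⟩
          simp only [bScan, hc]
          rw [if_neg (by omega)]
          exact hscan
      · -- record unchanged: new state (rec, hold, res1)
        have hstep : stepA (rec, hold, res) b
            = (rec, hold, res.insert b (res.getD b 0 + 1)) := by
          simp only [stepA, hc]
          rw [if_neg hgt]
        have hbh : b ≠ hold := by
          intro h; subst h
          rw [hhold] at hgt; omega
        have h1 : ∀ k, (res.insert b (res.getD b 0 + 1)).getD k 0 ≤ rec := by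
          intro k
          rw [PySem.Dict.getD_insert]
          split
          · omega
          · exact hle k
        have h2 : (res.insert b (res.getD b 0 + 1)).getD hold 0 = rec := by
          rw [PySem.Dict.getD_insert]
          rw [if_neg (fun h => hbh h.symm), hhold]
        have H := ih rec hold (res.insert b (res.getD b 0 + 1)) h1 h2
        simp only [List.foldl_cons, hstep]
        refine ⟨H.1, H.2.1, H.2.2.1, ?_⟩
        rcases H.2.2.2 with ⟨he, hh⟩ | ⟨hlt, hscan⟩
        · exact Or.inl ⟨he, hh⟩
        · refine Or.inr ⟨hlt, ?_⟩
          simp only [bScan, hc]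
          rw [if_neg (by omega)]
          exact hscan

-- ===== VERDICT (by name: the statement is the Claim_ definition above) =====
theorem balsojuma_rezultats_spec : Claim_equal_balsojuma_rezultats := by
  unfold Claim_equal_balsojuma_rezultats
  intro balsis _
  unfold Spec_balsojuma_rezultats
  cases balsis with
  | nil => rfl
  | cons b rest =>
      -- initial A step on b
      have hc1 : (PySem.Dict.empty.insert b ((PySem.Dict.empty : PySem.Dict String Int).getD b 0 + 1)).getD b 0 = 1 := by
        rw [PySem.Dict.getD_insert_self]; simp [PySem.Dict.getD_empty]
      have hstep : stepA (0, "", PySem.Dict.empty) b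
          = (1, b, PySem.Dict.empty.insert b ((PySem.Dict.empty : PySem.Dict String Int).getD b 0 + 1)) := by
        simp only [stepA, PySem.Dict.getD_insert_self, PySem.Dict.getD_empty]
        norm_num
      set res1 := PySem.Dict.empty.insert b ((PySem.Dict.empty : PySem.Dict String Int).getD b 0 + 1) with hres1
      have h1 : ∀ k, res1.getD k 0 ≤ 1 := by
        intro k
        rw [hres1, PySem.Dict.getD_insert]
        split
        · simp [PySem.Dict.getD_empty]
        · simp [PySem.Dict.getD_empty]
      have H := stepA_invariant rest 1 b res1 h1 hc1
      set st := rest.foldl stepA (1, b, res1) with hst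
      obtain ⟨hub, hhold, hdict, hdisj⟩ := H
      -- the final count dict is the counting fold from empty, i.e. counter (b :: rest)
      have hdict' : st.2.2 = (b :: rest).foldl (fun d b => d.insert b (d.getD b 0 + 1)) PySem.Dict.empty := by
        rw [hdict]; rfl
      have hcounter : st.2.2 = PySem.Dict.counter (b :: rest) := by
        rw [hdict', PySem.Dict.foldl_insert_getD_add_one_eq_counter]
      have hcnt : ∀ k, st.2.2.getD k 0 = ((b :: rest).count k : Int) := by
        intro k; rw [hcounter, PySem.Dict.getD_counter]
      -- record bounds: every count ≤ st.1, holder's count = st.1, st.1 ≥ 1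
      have hM1 : (1 : Int) ≤ st.1 := by
        rcases hdisj with ⟨he, _⟩ | ⟨hlt, _⟩
        · omega
        · omega
      have hholdmem : st.2.1 ∈ (b :: rest) := by
        have : ((b :: rest).count st.2.1 : Int) = st.1 := by rw [← hcnt]; exact hhold
        have hpos : 0 < (b :: rest).count st.2.1 := by omega
        exact List.count_pos_iff.mp hpos
      -- B's maximum m equals A's final record st.1
      have hvals : st.2.2.values = (PySem.Set.ofList (b :: rest)).map (fun k => (((b :: rest).count k : Int))) := by
        rw [hcounter]
        simp only [PySem.Dict.values, PySem.Dict.items_counter, List.map_map]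
        rfl
      have hMmem : st.1 ∈ st.2.2.values := by
        rw [hvals]
        refine List.mem_map.mpr ⟨st.2.1, ?_, ?_⟩
        · exact (PySem.Set.mem_ofList _ _).mpr hholdmem
        · rw [← hcnt]; exact hhold
      have hvalsub : ∀ v ∈ st.2.2.values, v ≤ st.1 := by
        intro v hv
        rw [hvals] at hv
        obtain ⟨k, _, hk⟩ := List.mem_map.mp hv
        rw [← hk, ← hcnt]; exact hub k
      obtain ⟨m0, hm0⟩ : ∃ m0, PySem.List.max? st.2.2.values (fun v => v) = some m0 := by
        cases h : PySem.List.max? st.2.2.values (fun v => v) with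
        | none =>
            exfalso
            have := (PySem.List.max?_eq_none_iff (xs := st.2.2.values) (key := fun v => v)).mp h
            rw [this] at hMmem; exact (List.not_mem_nil) hMmem
        | some m0 => exact ⟨m0, rfl⟩
      have hm0M : m0 = st.1 := by
        have hmem := PySem.List.max?_mem hm0
        have hle1 : m0 ≤ st.1 := hvalsub m0 hmem
        have hle2 : st.1 ≤ m0 := PySem.List.max?_isMax hm0 st.1 hMmem
        omega
      -- assemble: both sides reduce to [(st.2.1, st.1)]
      have hA : balsojuma_rezultats (b :: rest) = [(st.2.1, st.1)] := by
        unfold balsojuma_rezultats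
        simp only [List.foldl_cons, hstep, ← hst]
      rw [hA]
      unfold balsojuma_rezultats_alt
      rw [if_neg (by simp)]
      simp only [← hdict', hm0, Option.getD_some, hm0M]
      -- it remains: bScan st.1 empty (b :: rest) = [(st.2.1, st.1)]
      have hscan : bScan st.1 PySem.Dict.empty (b :: rest) = [(st.2.1, st.1)] := by
        simp only [bScan, ← hres1, hc1]
        rcases hdisj with ⟨he, hh⟩ | ⟨hlt, hsc⟩
        · rw [if_pos (by omega)]
          rw [hh, he]
        · rw [if_neg (by omega)]
          exact hsc
      exact hscan.symm
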